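-- pv_equiv track=rewrite | github.com/shanalishah/edprep-ai-prototype | backend/app/models/advanced_semantic_analyzer.py | _detect_grammar_errors
-- ===== SOURCE A (Python) =====
-- from typing import Dict, List, Tuple, Any, Optional
--
-- def _detect_grammar_errors(pos_tags: List[Tuple]) -> int:
--     """Detect basic grammar errors"""
--     errors = 0
--     words = [tag[0] for tag in pos_tags]
--
--     # Subject-verb agreement
--     for i in range(len(words) - 1):
--         if words[i] in ['he', 'she', 'it'] and words[i+1] in ['are', 'were', 'have']:
--             errors += 1
--         elif words[i] in ['i', 'you', 'we', 'they'] and words[i+1] in ['is', 'was', 'has']: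
--             errors += 1
--
--     return errors
-- ===== SOURCE B (Python) =====
-- def _detect_grammar_errors(pos_tags):
--     """Detect basic grammar errors"""
--     words = [tag[0] for tag in pos_tags]
--     n = len(words)
--     # staged passes: positions of each word class, then set intersections
--     sing_subj = {i for i in range(n - 1) if words[i] in ['he', 'she', 'it']}
--     plur_subj = {i for i in range(n - 1) if words[i] in ['i', 'you', 'we', 'they']}
--     plur_verb_prev = {i - 1 for i in range(1, n) if words[i] in ['are', 'were', 'have']}
--     sing_verb_prev = {i - 1 for i in range(1, n) if words[i] in ['is', 'was', 'has']}
--     return len(sing_subj & plur_verb_prev) + len(plur_subj & sing_verb_prev)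
-- ===== Notes on version B (the rewrite author's own statement) =====
-- stated objective: alternative
-- what changed: Replaces the single adjacent-pair scan with if/elif by four staged comprehension passes that build position sets (subject positions and shifted bad-verb positions) and returns the sizes of their two set intersections.
import Mathlib
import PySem

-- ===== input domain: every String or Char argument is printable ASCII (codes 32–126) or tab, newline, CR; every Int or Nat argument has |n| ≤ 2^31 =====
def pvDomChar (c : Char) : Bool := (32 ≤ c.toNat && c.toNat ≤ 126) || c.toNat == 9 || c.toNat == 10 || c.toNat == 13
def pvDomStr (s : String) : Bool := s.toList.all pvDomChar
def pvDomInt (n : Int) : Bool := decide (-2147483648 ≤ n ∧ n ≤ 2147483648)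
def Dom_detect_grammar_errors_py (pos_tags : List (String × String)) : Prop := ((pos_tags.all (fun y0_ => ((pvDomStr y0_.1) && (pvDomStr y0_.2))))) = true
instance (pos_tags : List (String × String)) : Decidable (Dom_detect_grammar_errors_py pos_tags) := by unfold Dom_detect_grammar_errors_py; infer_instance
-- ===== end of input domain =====

-- B replaces A's single adjacent-pair scan with if/elif by four staged comprehension passes
-- building position sets (subject positions, shifted bad-verb positions) and returning the
-- sizes of their two set intersections (alternative decomposition, same O(n) cost).

-- ===== PORT A =====
def detect_grammar_errors_py (pos_tags : List (String × String)) : Int :=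
  let words := pos_tags.map (fun tag => tag.1)
  (PySem.List.pyRange 0 ((words.length : Int) - 1) 1).foldl
    (fun errors i =>
      if PySem.List.pyGetD words i "" ∈ (["he", "she", "it"] : List String) ∧
         PySem.List.pyGetD words (i + 1) "" ∈ (["are", "were", "have"] : List String) then
        errors + 1
      else if PySem.List.pyGetD words i "" ∈ (["i", "you", "we", "they"] : List String) ∧
              PySem.List.pyGetD words (i + 1) "" ∈ (["is", "was", "has"] : List String) then
        errors + 1
      else errors)
    0

-- ===== PORT B =====
def detect_grammar_errors_py_alt (pos_tags : List (String × String)) : Int :=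
  let words := pos_tags.map (fun tag => tag.1)
  let n : Int := words.length
  let sing_subj : PySem.Set Int := PySem.Set.ofList
    ((PySem.List.pyRange 0 (n - 1) 1).filter
      (fun i => decide (PySem.List.pyGetD words i "" ∈ (["he", "she", "it"] : List String))))
  let plur_subj : PySem.Set Int := PySem.Set.ofList
    ((PySem.List.pyRange 0 (n - 1) 1).filter
      (fun i => decide (PySem.List.pyGetD words i "" ∈ (["i", "you", "we", "they"] : List String))))
  let plur_verb_prev : PySem.Set Int := PySem.Set.ofList
    (((PySem.List.pyRange 1 n 1).filter
      (fun i => decide (PySem.List.pyGetD words i "" ∈ (["are", "were", "have"] : List String)))).map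
      (fun i => i - 1))
  let sing_verb_prev : PySem.Set Int := PySem.Set.ofList
    (((PySem.List.pyRange 1 n 1).filter
      (fun i => decide (PySem.List.pyGetD words i "" ∈ (["is", "was", "has"] : List String)))).map
      (fun i => i - 1))
  ((PySem.Set.inter sing_subj plur_verb_prev).length : Int) +
    ((PySem.Set.inter plur_subj sing_verb_prev).length : Int)

-- ===== PRECONDITION & SPEC =====
def Spec_detect_grammar_errors_py (pos_tags : List (String × String)) (out : Int) : Prop := out = detect_grammar_errors_py_alt pos_tags
instance (pos_tags : List (String × String)) (out : Int) : Decidable (Spec_detect_grammar_errors_py pos_tags out) := by unfold Spec_detect_grammar_errors_py; infer_instance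

-- ===== CLAIM (what is proved, stated in full; the proofs are below) =====
def Claim_equal_detect_grammar_errors_py : Prop := ∀ (pos_tags : List (String × String)), Dom_detect_grammar_errors_py pos_tags → Spec_detect_grammar_errors_py pos_tags (detect_grammar_errors_py pos_tags)

-- ===== LEMMAS AND PROOFS =====

lemma pv_rng0 (t : Nat) :
    PySem.List.pyRange 0 ((t : Int)) 1 = (List.range t).map (fun (k : Nat) => (k : Int)) := by
  rw [PySem.List.pyRange_one]
  have h : ((t : Int) - 0).toNat = t := by omega
  rw [h]
  exact List.map_congr_left (fun k _ => by simp)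

lemma pv_rng1 (t : Nat) :
    PySem.List.pyRange 1 ((t : Int) + 1) 1 = (List.range t).map (fun (k : Nat) => 1 + (k : Int)) := by
  rw [PySem.List.pyRange_one]
  have h : (((t : Int) + 1) - 1).toNat = t := by omega
  rw [h]

-- length of one of B's intersections, as a countP over List.range
lemma pv_inter_len (ws : List String) (t : Nat) (ps qs : List String) :
    ((PySem.Set.inter
        (PySem.Set.ofList ((PySem.List.pyRange 0 (t : Int) 1).filter
          (fun i => decide (PySem.List.pyGetD ws i "" ∈ ps))))
        (PySem.Set.ofList (((PySem.List.pyRange 1 ((t : Int) + 1) 1).filter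
          (fun i => decide (PySem.List.pyGetD ws i "" ∈ qs))).map (fun i => i - 1)))).length)
      = (List.range t).countP
          (fun (k : Nat) => decide (PySem.List.pyGetD ws (k : Int) "" ∈ ps ∧
                            PySem.List.pyGetD ws ((k : Int) + 1) "" ∈ qs)) := by
  rw [pv_rng0, pv_rng1]
  rw [List.filter_map, List.filter_map, List.map_map]
  have hshift : (((List.range t).filter
        ((fun i => decide (PySem.List.pyGetD ws i "" ∈ qs)) ∘ (fun (k : Nat) => 1 + (k : Int)))).map
        ((fun i => i - 1) ∘ (fun (k : Nat) => 1 + (k : Int))))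
      = ((List.range t).filter
        ((fun i => decide (PySem.List.pyGetD ws i "" ∈ qs)) ∘ (fun (k : Nat) => 1 + (k : Int)))).map
          (fun (k : Nat) => (k : Int)) :=
    List.map_congr_left (fun k _ => by simp)
  rw [hshift]
  have hinj : Function.Injective (fun k : Nat => (k : Int)) := fun a b h => Nat.cast_inj.mp h
  have hnd1 : (((List.range t).filter
      ((fun i => decide (PySem.List.pyGetD ws i "" ∈ ps)) ∘ (fun (k : Nat) => (k : Int)))).map
      (fun (k : Nat) => (k : Int))).Nodup :=
    ((List.nodup_range).filter _).map hinj
  have hnd2 : (((List.range t).filter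
      ((fun i => decide (PySem.List.pyGetD ws i "" ∈ qs)) ∘ (fun (k : Nat) => 1 + (k : Int)))).map
      (fun (k : Nat) => (k : Int))).Nodup :=
    ((List.nodup_range).filter _).map hinj
  rw [PySem.Set.ofList_eq_self_of_nodup _ hnd1, PySem.Set.ofList_eq_self_of_nodup _ hnd2]
  show ((((List.range t).filter _).map _).filter _).length = _
  rw [List.filter_map, List.length_map, List.filter_filter, ← List.countP_eq_length_filter]
  apply List.countP_congr
  intro k hk
  have hkt : k < t := List.mem_range.mp hk
  constructor
  · intro h
    simp only [Function.comp, Bool.and_eq_true, decide_eq_true_eq] at h ⊢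
    obtain ⟨hc, hp⟩ := h
    refine ⟨hp, ?_⟩
    have hmem := (PySem.Set.contains_iff _ _).mp hc
    simp only [List.mem_map, List.mem_filter, List.mem_range, Function.comp,
      decide_eq_true_eq] at hmem
    obtain ⟨j, ⟨hj, hq⟩, hje⟩ := hmem
    have hjk : j = k := by omega
    subst hjk
    rwa [show (j : Int) + 1 = 1 + (j : Int) by ring]
  · intro h
    simp only [decide_eq_true_eq] at h
    obtain ⟨hp, hq⟩ := h
    simp only [Function.comp, Bool.and_eq_true, decide_eq_true_eq]
    refine ⟨?_, hp⟩
    apply (PySem.Set.contains_iff _ _).mpr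
    simp only [List.mem_map, List.mem_filter, List.mem_range, Function.comp, decide_eq_true_eq]
    exact ⟨k, ⟨hkt, by rwa [show 1 + (k : Int) = (k : Int) + 1 by ring]⟩, rfl⟩

lemma pv_ite_or {p q : Prop} [Decidable p] [Decidable q] (x y : Int) :
    (if p then x else if q then x else y) = if p ∨ q then x else y := by
  by_cases hp : p <;> by_cases hq : q <;> simp [hp, hq]

-- countP of a disjunction of pointwise-exclusive predicates splits into a sum
lemma pv_countP_or {α : Type} (l : List α) (p q : α → Prop)
    [DecidablePred p] [DecidablePred q] (h : ∀ x ∈ l, ¬(p x ∧ q x)) :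
    l.countP (fun x => decide (p x ∨ q x))
      = l.countP (fun x => decide (p x)) + l.countP (fun x => decide (q x)) := by
  induction l with
  | nil => simp
  | cons a tl ih =>
    have ha := h a (by simp)
    have ht : ∀ x ∈ tl, ¬(p x ∧ q x) := fun x hx => h x (by simp [hx])
    simp only [List.countP_cons]
    rw [ih ht]
    by_cases hp : p a
    · have hq : ¬ q a := fun hq => ha ⟨hp, hq⟩
      simp [hp, hq]
      omega
    · by_cases hq : q a <;> simp [hp, hq] <;> omega

lemma pv_subj_disjoint (s : String) :
    ¬(s ∈ (["he", "she", "it"] : List String) ∧ s ∈ (["i", "you", "we", "they"] : List String)) := by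
  rintro ⟨h1, h2⟩
  simp only [List.mem_cons, List.not_mem_nil, or_false] at h1 h2
  rcases h1 with rfl | rfl | rfl <;> simp at h2

lemma pv_core (ws : List String) (t : Nat) (hlen : ws.length = t + 1) :
    (PySem.List.pyRange 0 ((ws.length : Int) - 1) 1).foldl
      (fun errors i =>
        if PySem.List.pyGetD ws i "" ∈ (["he", "she", "it"] : List String) ∧
           PySem.List.pyGetD ws (i + 1) "" ∈ (["are", "were", "have"] : List String) then
          errors + 1
        else if PySem.List.pyGetD ws i "" ∈ (["i", "you", "we", "they"] : List String) ∧
                PySem.List.pyGetD ws (i + 1) "" ∈ (["is", "was", "has"] : List String) then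
          errors + 1
        else errors)
      (0 : Int)
    = ((PySem.Set.inter
          (PySem.Set.ofList ((PySem.List.pyRange 0 ((ws.length : Int) - 1) 1).filter
            (fun i => decide (PySem.List.pyGetD ws i "" ∈ (["he", "she", "it"] : List String)))))
          (PySem.Set.ofList (((PySem.List.pyRange 1 (ws.length : Int) 1).filter
            (fun i => decide (PySem.List.pyGetD ws i "" ∈ (["are", "were", "have"] : List String)))).map
            (fun i => i - 1)))).length : Int)
      + ((PySem.Set.inter
          (PySem.Set.ofList ((PySem.List.pyRange 0 ((ws.length : Int) - 1) 1).filter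
            (fun i => decide (PySem.List.pyGetD ws i "" ∈ (["i", "you", "we", "they"] : List String)))))
          (PySem.Set.ofList (((PySem.List.pyRange 1 (ws.length : Int) 1).filter
            (fun i => decide (PySem.List.pyGetD ws i "" ∈ (["is", "was", "has"] : List String)))).map
            (fun i => i - 1)))).length : Int) := by
  have h1 : ((ws.length : Int)) = (t : Int) + 1 := by rw [hlen]; push_cast; ring
  have h2 : ((ws.length : Int)) - 1 = (t : Int) := by omega
  rw [h2, h1]
  rw [pv_inter_len, pv_inter_len]
  simp only [pv_ite_or]
  rw [pv_rng0, List.foldl_map, PySem.List.foldl_ite_add_one]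
  rw [pv_countP_or (List.range t)
    (fun k => PySem.List.pyGetD ws (k : Int) "" ∈ (["he", "she", "it"] : List String) ∧
              PySem.List.pyGetD ws ((k : Int) + 1) "" ∈ (["are", "were", "have"] : List String))
    (fun k => PySem.List.pyGetD ws (k : Int) "" ∈ (["i", "you", "we", "they"] : List String) ∧
              PySem.List.pyGetD ws ((k : Int) + 1) "" ∈ (["is", "was", "has"] : List String))
    (fun k _ hc => pv_subj_disjoint (PySem.List.pyGetD ws (k : Int) "") ⟨hc.1.1, hc.2.1⟩)]
  push_cast
  ring

-- ===== VERDICT (by name: the statement is the Claim_ definition above) =====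
theorem detect_grammar_errors_py_spec : Claim_equal_detect_grammar_errors_py := by
  intro pos_tags _
  unfold Spec_detect_grammar_errors_py detect_grammar_errors_py detect_grammar_errors_py_alt
  cases pos_tags with
  | nil => decide
  | cons p ps =>
    have hlen : ((p :: ps).map (fun tag => tag.1)).length = ps.length + 1 := by
      simp
    simpa using pv_core ((p :: ps).map (fun tag => tag.1)) ps.length hlen
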